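-- pv_equiv track=rewrite | github.com/Afomiat/competitive-programming | work/week1/maximum-sum-obtained-of-any-permutation.py | maxSumRangeQuery
-- ===== SOURCE A (Python) =====
-- from typing import List
--
-- def maxSumRangeQuery(nums: List[int], requests: List[List[int]]) -> int:
--     n = len(nums)
--     pref = [0] * n
--
--     for a, b in requests:
--         pref[a] += 1
--         if b + 1 < n:
--             pref[b + 1] -= 1
--
--     for i in range(1, n):
--         pref[i] += pref[i - 1]
--
--     pref.sort(reverse=True)
--     nums.sort(reverse=True)
--
--     result = 0
--     mod = 10**9 + 7
--
--     for i in range(n):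
--         result = (result + pref[i] * nums[i]) % mod
--
--     return result
-- ===== SOURCE B (Python) =====
-- def maxSumRangeQuery(nums, requests):
--     n = len(nums)
--     freq = [0] * n
--     for a, b in requests:
--         for i in range(a, b + 1):
--             freq[i] += 1
--     total = 0
--     mod = 10 ** 9 + 7
--     for f, v in zip(sorted(freq, reverse=True), sorted(nums, reverse=True)):
--         total = (total + f * v) % mod
--     return total
-- ===== Notes on version B (the rewrite author's own statement) =====
-- stated objective: simpler
-- what changed: Replaces the difference-array + in-place prefix-sum frequency computation with a direct nested-loop count over each request's range, and replaces the in-place sorts and index loop with sorted() copies zipped together (B does not mutate nums, A sorts it in place).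
-- outside the precondition, e.g. on maxSumRangeQuery([10, 20], [[-1, 0]]): A returns 0, B returns 30; on maxSumRangeQuery([10, 20], [[0, 5]]): A returns 30, B raises IndexError; on maxSumRangeQuery([1, 1, 1], [[2, 0]]): A returns 1000000006, B returns 0
import Mathlib
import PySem

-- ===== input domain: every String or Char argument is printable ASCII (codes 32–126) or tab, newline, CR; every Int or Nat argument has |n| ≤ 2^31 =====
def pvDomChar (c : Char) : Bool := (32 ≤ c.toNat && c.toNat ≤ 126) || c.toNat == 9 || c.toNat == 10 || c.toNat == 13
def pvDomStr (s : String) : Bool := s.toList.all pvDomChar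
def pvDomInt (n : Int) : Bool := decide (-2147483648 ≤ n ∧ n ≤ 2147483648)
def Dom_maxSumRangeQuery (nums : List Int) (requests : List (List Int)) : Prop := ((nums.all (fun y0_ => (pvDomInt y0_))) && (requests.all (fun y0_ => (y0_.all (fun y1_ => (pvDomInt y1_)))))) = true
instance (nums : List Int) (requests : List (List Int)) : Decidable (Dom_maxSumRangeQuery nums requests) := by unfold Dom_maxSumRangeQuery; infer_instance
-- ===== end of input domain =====

-- B replaces A's difference-array + in-place prefix-sum frequency computation with a direct
-- nested-loop count per request (objective: simpler). Note: A sorts `nums` in place, B does not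
-- mutate its arguments; the equivalence proved here is about the return value.

-- ===== PORT A =====
-- one iteration of "for a, b in requests: pref[a] += 1; if b+1 < n: pref[b+1] -= 1"
def aStep (n : Int) (p : List Int) (r : List Int) : List Int :=
  match r with
  | [a, b] =>
    let p := PySem.List.pySetD p a (PySem.List.pyGetD p a 0 + 1)
    if b + 1 < n then PySem.List.pySetD p (b + 1) (PySem.List.pyGetD p (b + 1) 0 - 1) else p
  | _ => p

-- one iteration of "for i in range(1, n): pref[i] += pref[i-1]"
def aPrefixStep (p : List Int) (i : Int) : List Int :=
  PySem.List.pySetD p i (PySem.List.pyGetD p i 0 + PySem.List.pyGetD p (i - 1) 0)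

def maxSumRangeQuery (nums : List Int) (requests : List (List Int)) : Int :=
  let n : Int := nums.length
  let pref := (PySem.List.pyRange 1 n 1).foldl aPrefixStep
    (requests.foldl (aStep n) (List.replicate nums.length 0))
  let prefS := PySem.List.sorted pref (fun x => x) true
  let numsS := PySem.List.sorted nums (fun x => x) true
  (PySem.List.pyRange 0 n 1).foldl (fun r i =>
    PySem.Int.mod (r + PySem.List.pyGetD prefS i 0 * PySem.List.pyGetD numsS i 0) (10 ^ 9 + 7)) 0

-- ===== PORT B =====
-- one iteration of "for a, b in requests: for i in range(a, b+1): freq[i] += 1"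
def bStep (p : List Int) (r : List Int) : List Int :=
  match r with
  | [a, b] => (PySem.List.pyRange a (b + 1) 1).foldl
      (fun q i => PySem.List.pySetD q i (PySem.List.pyGetD q i 0 + 1)) p
  | _ => p

def maxSumRangeQuery_alt (nums : List Int) (requests : List (List Int)) : Int :=
  let freq := requests.foldl bStep (List.replicate nums.length 0)
  ((PySem.List.sorted freq (fun x => x) true).zip (PySem.List.sorted nums (fun x => x) true)).foldl
    (fun t fv => PySem.Int.mod (t + fv.1 * fv.2) (10 ^ 9 + 7)) 0

-- ===== PRECONDITION & SPEC =====
-- Pre_ restricts to the problem's natural domain: every request is a pair [a, b] with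
-- 0 ≤ a ≤ b < len(nums). Outside it A either raises (index out of [-n, n), or a request not of
-- length 2) or returns an artefact of its implementation (negative-index wraparound, silent
-- clamping of b ≥ n, negative "coverage" for reversed requests a > b).
def Pre_maxSumRangeQuery (nums : List Int) (requests : List (List Int)) : Prop :=
  (requests.all (fun r =>
    match r with
    | [a, b] => decide (0 ≤ a ∧ a ≤ b ∧ b < (nums.length : Int))
    | _ => false)) = true
instance (nums : List Int) (requests : List (List Int)) : Decidable (Pre_maxSumRangeQuery nums requests) := by unfold Pre_maxSumRangeQuery; infer_instance

def pvWitness_maxSumRangeQuery : List Int × List (List Int) := ([3, -1, 4, 1], [[0, 2], [1, 3], [2, 2]])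

def Spec_maxSumRangeQuery (nums : List Int) (requests : List (List Int)) (out : Int) : Prop := out = maxSumRangeQuery_alt nums requests
instance (nums : List Int) (requests : List (List Int)) (out : Int) : Decidable (Spec_maxSumRangeQuery nums requests out) := by unfold Spec_maxSumRangeQuery; infer_instance

-- ===== CLAIM (what is proved, stated in full; the proofs are below) =====
def Claim_equal_maxSumRangeQuery : Prop := ∀ (nums : List Int) (requests : List (List Int)), Dom_maxSumRangeQuery nums requests → Pre_maxSumRangeQuery nums requests → Spec_maxSumRangeQuery nums requests (maxSumRangeQuery nums requests)

-- ===== LEMMAS AND PROOFS =====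

-- a request admitted by Pre_: a pair [a, b] with 0 ≤ a ≤ b < n
def ValidReq (n : Nat) (r : List Int) : Prop :=
  ∃ a b : Int, r = [a, b] ∧ 0 ≤ a ∧ a ≤ b ∧ b < (n : Int)

-- per-point contribution of one request in A's difference array
def deltaInd (n : Nat) (r : List Int) (k : Nat) : Int :=
  match r with
  | [a, b] => (if (k : Int) = a then 1 else 0) - (if (k : Int) = b + 1 ∧ b + 1 < (n : Int) then 1 else 0)
  | _ => 0

-- per-point contribution of one request to the coverage count
def covInd (r : List Int) (k : Nat) : Int :=
  match r with
  | [a, b] => if a ≤ (k : Int) ∧ (k : Int) ≤ b then 1 else 0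
  | _ => 0

theorem getD_set' (p : List Int) (j k : Nat) (v : Int) (hj : j < p.length) :
    (p.set j v).getD k 0 = if k = j then v else p.getD k 0 := by
  simp only [List.getD_eq_getElem?_getD, List.getElem?_set]
  by_cases h : k = j
  · simp [h, hj]
  · simp [h, Ne.symm h]

theorem bump_getD (p : List Int) (i : Int) (d : Int) (k : Nat)
    (h0 : 0 ≤ i) (h1 : i < (p.length : Int)) :
    (PySem.List.pySetD p i (PySem.List.pyGetD p i 0 + d)).getD k 0
      = p.getD k 0 + (if (k : Int) = i then d else 0) := by
  rw [PySem.List.pySetD_of_nonneg p _ h0,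
      PySem.List.pyGetD_eq_getElem p 0 h0 h1,
      getD_set' p i.toNat k _ (by omega)]
  by_cases hk : (k : Int) = i
  · have hk' : k = i.toNat := by omega
    rw [if_pos hk', if_pos hk, hk', List.getD_eq_getElem p 0 (by omega)]
  · have hk' : k ≠ i.toNat := by omega
    rw [if_neg hk', if_neg hk, add_zero]

theorem aStep_length (n : Int) (p : List Int) (r : List Int) :
    (aStep n p r).length = p.length := by
  rcases r with _ | ⟨a, _ | ⟨b, _ | ⟨c, t⟩⟩⟩
  · rfl
  · rfl
  · simp only [aStep]
    split <;> simp
  · rfl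

theorem aFold_length (requests : List (List Int)) (n : Int) :
    ∀ p : List Int, (requests.foldl (aStep n) p).length = p.length := by
  induction requests with
  | nil => intro p; rfl
  | cons r t ih => intro p; rw [List.foldl_cons, ih, aStep_length]

theorem aDelta_getD (requests : List (List Int)) :
    ∀ (n : Nat) (p : List Int) (k : Nat), p.length = n →
    (∀ r ∈ requests, ValidReq n r) → k < n →
    (requests.foldl (aStep (n : Int)) p).getD k 0
      = p.getD k 0 + (requests.map (fun r => deltaInd n r k)).sum := by
  induction requests with
  | nil => intro n p k _ _ _; simp
  | cons r rs ih =>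
    intro n p k hp hv hk
    obtain ⟨a, b, rfl, ha, hab, hb⟩ := hv r (by simp)
    simp only [List.foldl_cons, List.map_cons, List.sum_cons]
    rw [ih n _ k (by rw [aStep_length]; exact hp)
        (fun r hr => hv r (by simp [hr])) hk]
    have hstep : (aStep (n : Int) p [a, b]).getD k 0 = p.getD k 0 + deltaInd n [a, b] k := by
      simp only [aStep, deltaInd]
      by_cases hcond : b + 1 < (n : Int)
      · rw [if_pos hcond]
        have hsub : ∀ (q : List Int) (i : Int),
            PySem.List.pyGetD q i 0 - 1 = PySem.List.pyGetD q i 0 + (-1) := by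
          intro q i; ring
        rw [hsub, bump_getD _ (b + 1) (-1) k (by omega)
              (by rw [PySem.List.length_pySetD, hp]; omega),
            bump_getD p a 1 k ha (by omega)]
        split_ifs <;> omega
      · rw [if_neg hcond, bump_getD p a 1 k ha (by omega)]
        have : ¬ ((k : Int) = b + 1 ∧ b + 1 < (n : Int)) := by omega
        rw [if_neg this]
        split_ifs <;> omega
    rw [hstep]; ring

theorem rangeBump_length (l : List Int) :
    ∀ p : List Int,
    (l.foldl (fun q i => PySem.List.pySetD q i (PySem.List.pyGetD q i 0 + 1)) p).length
      = p.length := by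
  induction l with
  | nil => intro p; rfl
  | cons x t ih => intro p; rw [List.foldl_cons, ih, PySem.List.length_pySetD]

theorem rangeBump_getD (m : Nat) :
    ∀ (a b : Int) (p : List Int) (k : Nat), (b + 1 - a).toNat = m → 0 ≤ a →
    b < (p.length : Int) → k < p.length →
    ((PySem.List.pyRange a (b + 1) 1).foldl
        (fun q i => PySem.List.pySetD q i (PySem.List.pyGetD q i 0 + 1)) p).getD k 0
      = p.getD k 0 + (if a ≤ (k : Int) ∧ (k : Int) ≤ b then 1 else 0) := by
  induction m with
  | zero =>
    intro a b p k hm ha hb hk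
    rw [PySem.List.pyRange_one_eq_nil (by omega)]
    have : ¬ (a ≤ (k : Int) ∧ (k : Int) ≤ b) := by omega
    rw [if_neg this, List.foldl_nil, add_zero]
  | succ m ih =>
    intro a b p k hm ha hb hk
    rw [PySem.List.pyRange_one_cons (by omega), List.foldl_cons]
    rw [ih (a + 1) b _ k (by omega) (by omega)
        (by rw [PySem.List.length_pySetD]; exact hb)
        (by rw [PySem.List.length_pySetD]; exact hk)]
    rw [bump_getD p a 1 k ha (by omega)]
    split_ifs <;> omega

theorem bStep_length (p : List Int) (r : List Int) : (bStep p r).length = p.length := by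
  rcases r with _ | ⟨a, _ | ⟨b, _ | ⟨c, t⟩⟩⟩ <;> simp [bStep, rangeBump_length]

theorem bFold_length (requests : List (List Int)) :
    ∀ p : List Int, (requests.foldl bStep p).length = p.length := by
  induction requests with
  | nil => intro p; rfl
  | cons r t ih => intro p; rw [List.foldl_cons, ih, bStep_length]

theorem bFreq_getD (requests : List (List Int)) :
    ∀ (n : Nat) (p : List Int) (k : Nat), p.length = n →
    (∀ r ∈ requests, ValidReq n r) → k < n →
    (requests.foldl bStep p).getD k 0
      = p.getD k 0 + (requests.map (fun r => covInd r k)).sum := by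
  induction requests with
  | nil => intro n p k _ _ _; simp
  | cons r rs ih =>
    intro n p k hp hv hk
    obtain ⟨a, b, rfl, ha, hab, hb⟩ := hv r (by simp)
    simp only [List.foldl_cons, List.map_cons, List.sum_cons]
    rw [ih n _ k (by rw [bStep_length]; exact hp)
        (fun r hr => hv r (by simp [hr])) hk]
    have hstep : (bStep p [a, b]).getD k 0 = p.getD k 0 + covInd [a, b] k := by
      simp only [bStep, covInd]
      exact rangeBump_getD (b + 1 - a).toNat a b p k rfl ha (by omega) (by omega)
    rw [hstep]; ring

theorem prefix_length (l : List Int) :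
    ∀ d : List Int, (l.foldl aPrefixStep d).length = d.length := by
  induction l with
  | nil => intro d; rfl
  | cons x t ih => intro d; rw [List.foldl_cons, ih, aPrefixStep, PySem.List.length_pySetD]

theorem prefix_getD (m : Nat) :
    ∀ (d : List Int), m ≤ d.length → ∀ k < d.length,
    ((PySem.List.pyRange 1 (m : Int) 1).foldl aPrefixStep d).getD k 0
      = if k < m then ∑ j ∈ Finset.range (k + 1), d.getD j 0 else d.getD k 0 := by
  induction m with
  | zero =>
    intro d _ k hk
    rw [PySem.List.pyRange_one_eq_nil (by omega), List.foldl_nil, if_neg (by omega)]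
  | succ m ih =>
    intro d hd k hk
    by_cases hm : m = 0
    · subst hm
      rw [show ((0 + 1 : Nat) : Int) = 1 by norm_num,
          PySem.List.pyRange_one_eq_nil (by omega), List.foldl_nil]
      split_ifs with h
      · have : k = 0 := by omega
        subst this; simp
      · rfl
    · rw [show ((m + 1 : Nat) : Int) = (m : Int) + 1 by push_cast; ring,
          PySem.List.pyRange_one_succ_right (by omega), List.foldl_append,
          List.foldl_cons, List.foldl_nil]
      have hql := prefix_length (PySem.List.pyRange 1 (m : Int) 1) d
      rw [aPrefixStep,
          bump_getD _ (m : Int) _ k (by omega) (by rw [hql]; omega),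
          show ((m : Int) - 1) = ((m - 1 : Nat) : Int) by omega,
          PySem.List.pyGetD_natCast,
          ih d (by omega) k hk,
          ih d (by omega) (m - 1) (by omega),
          if_pos (show m - 1 < m by omega)]
      simp only [Nat.cast_inj]
      by_cases hkm : k = m
      · subst hkm
        rw [if_neg (lt_irrefl k), if_pos rfl, if_pos (Nat.lt_succ_self k),
            show k - 1 + 1 = k by omega, Finset.sum_range_succ]
        ring
      · rw [if_neg hkm, add_zero]
        by_cases hklt : k < m
        · rw [if_pos hklt, if_pos (by omega)]
        · rw [if_neg hklt, if_neg (by omega)]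

theorem sum_swap_list (l : List (List Int)) (K : Nat) (f : List Int → Nat → Int) :
    ∑ j ∈ Finset.range K, (l.map (fun r => f r j)).sum
      = (l.map (fun r => ∑ j ∈ Finset.range K, f r j)).sum := by
  induction l with
  | nil => simp
  | cons r t ih => simp [Finset.sum_add_distrib, ih]

theorem sumInd (c : Int) (K : Nat) :
    (∑ j ∈ Finset.range K, if (j : Int) = c then (1 : Int) else 0)
      = if 0 ≤ c ∧ c < (K : Int) then 1 else 0 := by
  induction K with
  | zero => rw [Finset.sum_range_zero, if_neg (by omega)]
  | succ K ih => rw [Finset.sum_range_succ, ih]; split_ifs <;> omega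

theorem deltaCov (n k : Nat) (a b : Int) (ha : 0 ≤ a) (hab : a ≤ b) (hb : b < (n : Int))
    (hk : k < n) :
    (∑ j ∈ Finset.range (k + 1), deltaInd n [a, b] j) = covInd [a, b] k := by
  simp only [deltaInd, covInd]
  by_cases hc : b + 1 < (n : Int)
  · simp only [hc, and_true]
    rw [Finset.sum_sub_distrib, sumInd, sumInd]
    split_ifs <;> omega
  · have hz : ∀ j : Nat, (if (j : Int) = b + 1 ∧ b + 1 < (n : Int) then (1 : Int) else 0) = 0 := by
      intro j; rw [if_neg (fun hh => hc hh.2)]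
    simp only [hz, sub_zero]
    rw [sumInd]
    split_ifs <;> omega

theorem tailEq (xs ys : List Int) (M : Int) (h : xs.length = ys.length) :
    (PySem.List.pyRange 0 (ys.length : Int) 1).foldl (fun r i =>
        PySem.Int.mod (r + PySem.List.pyGetD xs i 0 * PySem.List.pyGetD ys i 0) M) 0
      = (xs.zip ys).foldl (fun t fv => PySem.Int.mod (t + fv.1 * fv.2) M) 0 := by
  have hz : (xs.zip ys).length = ys.length := by simp [List.length_zip, h]
  have step1 : ∀ (acc : Int) (i : Int), i ∈ PySem.List.pyRange 0 (ys.length : Int) 1 →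
      PySem.Int.mod (acc + PySem.List.pyGetD xs i 0 * PySem.List.pyGetD ys i 0) M
        = PySem.Int.mod (acc + (PySem.List.pyGetD (xs.zip ys) i (0, 0)).1
            * (PySem.List.pyGetD (xs.zip ys) i (0, 0)).2) M := by
    intro acc i hi
    rw [PySem.List.mem_pyRange_one] at hi
    rw [PySem.List.pyGetD_eq_getElem xs 0 (by omega) (by omega),
        PySem.List.pyGetD_eq_getElem ys 0 (by omega) (by omega),
        PySem.List.pyGetD_eq_getElem (xs.zip ys) (0, 0) (by omega) (by omega)]
    simp [List.getElem_zip]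
  rw [PySem.List.foldl_congr_mem (PySem.List.pyRange 0 (ys.length : Int) 1)
        (fun r i => PySem.Int.mod (r + PySem.List.pyGetD xs i 0 * PySem.List.pyGetD ys i 0) M)
        (fun r i => PySem.Int.mod (r + (PySem.List.pyGetD (xs.zip ys) i (0, 0)).1
          * (PySem.List.pyGetD (xs.zip ys) i (0, 0)).2) M) 0 step1,
      show (ys.length : Int) = ((xs.zip ys).length : Int) by rw [hz]]
  exact PySem.List.foldl_pyRange_zero_pyGetD' (xs.zip ys) (0, 0)
    (fun t fv => PySem.Int.mod (t + fv.1 * fv.2) M) (0 : Int)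

theorem maxSumRangeQuery_key (nums : List Int) (requests : List (List Int))
    (h : Pre_maxSumRangeQuery nums requests) :
    maxSumRangeQuery nums requests = maxSumRangeQuery_alt nums requests := by
  have hv : ∀ r ∈ requests, ValidReq nums.length r := by
    intro r hr
    have h2 := (List.all_eq_true.mp h) r hr
    rcases r with _ | ⟨a, _ | ⟨b, _ | ⟨c, t⟩⟩⟩ <;> simp at h2
    exact ⟨a, b, rfl, h2.1, h2.2.1, h2.2.2⟩
  simp only [maxSumRangeQuery, maxSumRangeQuery_alt]
  have hdlen := aFold_length requests (nums.length : Int) (List.replicate nums.length 0)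
  rw [List.length_replicate] at hdlen
  have hpreflen := prefix_length (PySem.List.pyRange 1 (nums.length : Int) 1)
      (requests.foldl (aStep (nums.length : Int)) (List.replicate nums.length 0))
  rw [hdlen] at hpreflen
  have hfreqlen : (requests.foldl bStep (List.replicate nums.length 0)).length = nums.length := by
    rw [bFold_length, List.length_replicate]
  have hEq : (PySem.List.pyRange 1 (nums.length : Int) 1).foldl aPrefixStep
        (requests.foldl (aStep (nums.length : Int)) (List.replicate nums.length 0))
      = requests.foldl bStep (List.replicate nums.length 0) := by
    apply List.ext_getElem (by rw [hpreflen, hfreqlen])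
    intro k hk1 hk2
    rw [← List.getD_eq_getElem _ 0 hk1, ← List.getD_eq_getElem _ 0 hk2]
    have hkn : k < nums.length := by rw [hpreflen] at hk1; exact hk1
    rw [prefix_getD nums.length _ hdlen.ge k (by rw [hdlen]; exact hkn),
        if_pos hkn]
    rw [bFreq_getD requests nums.length _ k (by simp) hv hkn]
    have hterm : ∀ j < nums.length,
        (requests.foldl (aStep (nums.length : Int)) (List.replicate nums.length 0)).getD j 0
          = (requests.map (fun r => deltaInd nums.length r j)).sum := by
      intro j hj
      rw [aDelta_getD requests nums.length _ j (by simp) hv hj]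
      simp
    calc (∑ j ∈ Finset.range (k + 1),
            (requests.foldl (aStep (nums.length : Int)) (List.replicate nums.length 0)).getD j 0)
        = ∑ j ∈ Finset.range (k + 1), (requests.map (fun r => deltaInd nums.length r j)).sum := by
          apply Finset.sum_congr rfl
          intro j hj
          exact hterm j (by simp at hj; omega)
      _ = (requests.map (fun r => ∑ j ∈ Finset.range (k + 1), deltaInd nums.length r j)).sum := by
          rw [sum_swap_list]
      _ = (requests.map (fun r => covInd r k)).sum := by
          congr 1
          apply List.map_congr_left
          intro r hr
          obtain ⟨a, b, rfl, ha, hab, hb⟩ := hv r hr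
          exact deltaCov nums.length k a b ha hab hb hkn
      _ = (List.replicate nums.length (0 : Int)).getD k 0
            + (requests.map (fun r => covInd r k)).sum := by simp
  rw [hEq]
  have hslen : (PySem.List.sorted (requests.foldl bStep (List.replicate nums.length 0))
      (fun x => x) true).length
      = (PySem.List.sorted nums (fun x => x) true).length := by
    rw [PySem.List.length_sorted, PySem.List.length_sorted, hfreqlen]
  rw [show (nums.length : Int)
      = ((PySem.List.sorted nums (fun x => x) true).length : Int) by
        rw [PySem.List.length_sorted]]
  exact tailEq _ _ _ hslen

-- ===== VERDICT (by name: the statement is the Claim_ definition above) =====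
theorem maxSumRangeQuery_spec : Claim_equal_maxSumRangeQuery := by
  intro nums requests _ hpre
  exact maxSumRangeQuery_key nums requests hpre
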